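-- pv_equiv track=rewrite | github.com/zorchp/dsa | lc/str_/KMP.py | NEXT1
-- ===== SOURCE A (Python) =====
-- from typing import List
--
-- def NEXT1(s: str) -> List[int]:
--     ans = [0]
--     for i in range(1, len(s)):
--         tmp = 0
--         L, R = 0, i  # 用双指针进行计算
--         while L < R:  # 还有优化空间
--             if s[L] == s[R]:
--                 tmp += 1
--             else:
--                 break
--             L += 1
--             R -= 1
--         ans.append(tmp)
--     return ans
-- ===== SOURCE B (Python) =====
-- def NEXT1(s):
--     # One reversal + C-level slice comparison per prefix, with the pair cap (i+1)//2
--     # computed arithmetically instead of walking two pointers inward.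
--     # Intended difference: on the empty string this returns [] (one entry per prefix),
--     # where the original returns [0].
--     n = len(s)
--     r = s[::-1]
--     ans = []
--     for i in range(n):
--         m = (i + 1) // 2
--         p = s[:m]
--         q = r[n - 1 - i : n - 1 - i + m]
--         if p == q:
--             ans.append(m)
--         else:
--             ans.append(next(j for j in range(m) if p[j] != q[j]))
--     return ans
-- ===== Notes on version B (the rewrite author's own statement) =====
-- stated objective: alternative
-- what changed: B reverses the string once and, for each prefix end i, compares the length-((i+1)//2) prefix against the matching slice of the reversed string (a single C-level slice comparison, falling back to a first-mismatch scan), instead of A's per-i two-pointer inward walk; the pair cap is a closed-form (i+1)//2.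
-- intended difference: On the empty string A returns [0] while B returns [], the intended one-entry-per-prefix-end answer (the result array should have one entry per character). — e.g. on NEXT1(""): A returns [0], B returns []
import Mathlib
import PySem

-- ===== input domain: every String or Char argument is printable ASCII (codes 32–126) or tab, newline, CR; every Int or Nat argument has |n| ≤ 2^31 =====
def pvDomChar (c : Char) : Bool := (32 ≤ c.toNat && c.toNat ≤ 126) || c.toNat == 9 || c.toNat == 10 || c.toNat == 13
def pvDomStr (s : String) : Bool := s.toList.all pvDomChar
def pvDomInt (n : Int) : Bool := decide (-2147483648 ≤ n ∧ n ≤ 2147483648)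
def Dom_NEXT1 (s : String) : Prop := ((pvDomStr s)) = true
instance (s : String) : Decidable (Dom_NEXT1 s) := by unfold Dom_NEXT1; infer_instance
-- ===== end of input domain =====

-- B replaces A's per-i two-pointer inward walk by one reversal plus, per prefix end,
-- a capped prefix/reversed-slice comparison with the pair cap as a closed form (i+1)//2;
-- on the empty string B returns [] (one entry per character) where A returns [0].


-- ===== PORT A =====
-- the while loop over L, R, tmp
def pvAloop (cs : List Char) (L R tmp : Int) : Int :=
  if _h : L < R then
    match PySem.List.pyGet? cs L, PySem.List.pyGet? cs R with
    | some a, some b => if a = b then pvAloop cs (L + 1) (R - 1) (tmp + 1) else tmp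
    | _, _ => tmp  -- Python would raise IndexError here; unreachable in NEXT1 (0 ≤ L < R ≤ i < len)
  else tmp
termination_by (R - L).toNat
decreasing_by simp_wf; omega

def NEXT1 (s : String) : List Int :=
  let cs := s.toList
  (PySem.List.pyRange 1 (cs.length : Int) 1).foldl (fun ans i => ans ++ [pvAloop cs 0 i 0]) [0]

-- ===== PORT B =====
-- first-mismatch scan: the 'next(j for j in range(m) if p[j] != q[j])' of Source B
-- (the exhausted-generator case is unreachable in NEXT1_alt: p ≠ q with equal lengths)
def pvLcp : List Char → List Char → Int
  | a :: as, b :: bs => if a = b then 1 + pvLcp as bs else 0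
  | _, _ => 0

def NEXT1_alt (s : String) : List Int :=
  let cs := s.toList
  let n : Int := cs.length
  let r := cs.reverse
  (PySem.List.pyRange 0 n 1).map (fun i =>
    let m := PySem.Int.floordiv (i + 1) 2
    let p := PySem.List.slice cs none (some m)
    let q := PySem.List.slice r (some (n - 1 - i)) (some (n - 1 - i + m))
    if p = q then ((p.length : Int)) else pvLcp p q)

-- ===== PRECONDITION & SPEC =====
-- On the empty string A returns [0] while B returns [], the intended one-entry-per-prefix-end answer.
def D_NEXT1 (s : String) : Prop := s = ""
instance (s : String) : Decidable (D_NEXT1 s) := by unfold D_NEXT1; infer_instance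
def Spec_NEXT1 (s : String) (out : List Int) : Prop := ¬ D_NEXT1 s → out = NEXT1_alt s
instance (s : String) (out : List Int) : Decidable (Spec_NEXT1 s out) := by unfold Spec_NEXT1; infer_instance
def pvDiffWitness_NEXT1 : String := ""
def pvDiffWitnessOut_NEXT1 : (List Int) × (List Int) := ([0], [])

-- ===== CLAIM =====
def Claim_unchanged_NEXT1 : Prop := ∀ (s : String), Dom_NEXT1 s → Spec_NEXT1 s (NEXT1 s)
def Claim_changed_NEXT1 : Prop := Dom_NEXT1 (pvDiffWitness_NEXT1) ∧ D_NEXT1 (pvDiffWitness_NEXT1) ∧ NEXT1 (pvDiffWitness_NEXT1) = pvDiffWitnessOut_NEXT1.1 ∧ NEXT1_alt (pvDiffWitness_NEXT1) = pvDiffWitnessOut_NEXT1.2 ∧ pvDiffWitnessOut_NEXT1.1 ≠ pvDiffWitnessOut_NEXT1.2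
def Claim_exact_NEXT1 : Prop := ∀ (s : String), Dom_NEXT1 s → D_NEXT1 s → NEXT1 s ≠ NEXT1_alt s

-- ===== LEMMAS AND PROOFS =====
lemma pvLcp_nonneg (x y : List Char) : 0 ≤ pvLcp x y := by
  induction x generalizing y with
  | nil => simp [pvLcp]
  | cons a as ih =>
    cases y with
    | nil => simp [pvLcp]
    | cons b bs =>
      simp only [pvLcp]
      split
      · have := ih bs; omega
      · omega

-- B's per-i body (capped comparison) computes min(lcp, cap)
lemma pvMirror_min (t : Nat) : ∀ (x y : List Char), t ≤ x.length → t ≤ y.length →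
    (if x.take t = y.take t then ((x.take t).length : Int) else pvLcp (x.take t) (y.take t))
      = min (pvLcp x y) (t : Int) := by
  induction t with
  | zero =>
    intro x y _ _
    have := pvLcp_nonneg x y
    simp
    omega
  | succ t ih =>
    intro x y hx hy
    match x, y with
    | [], _ => simp at hx
    | _, [] => simp at hy
    | a :: as, b :: bs =>
      simp only [List.length_cons, Nat.succ_le_succ_iff] at hx hy
      by_cases hab : a = b
      · subst hab
        have ih' := ih as bs hx hy
        simp only [List.take_succ_cons, pvLcp, if_true, List.length_cons]
        by_cases hq : as.take t = bs.take t
        · rw [if_pos (by rw [hq])]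
          rw [if_pos hq] at ih'
          push_cast at *
          omega
        · rw [if_neg (by simpa using hq)]
          rw [if_neg hq] at ih'
          push_cast at *
          omega
      · simp only [List.take_succ_cons, pvLcp, if_neg hab]
        rw [if_neg (by simp [hab])]
        push_cast
        omega

-- A's while loop computes tmp + min(lcp with the reversed prefix, pair cap)
lemma pvAloop_eq (cs : List Char) (k : Nat) : ∀ (L R tmp : Int), (R - L).toNat ≤ k →
    0 ≤ L → R < cs.length → L ≤ R + 1 →
    pvAloop cs L R tmp
      = tmp + min (pvLcp (cs.drop L.toNat) ((cs.take (R.toNat + 1)).reverse)) ((R - L + 1) / 2) := by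
  induction k with
  | zero =>
    intro L R tmp hk h0 hR hLR
    rw [pvAloop, dif_neg (by omega : ¬ L < R)]
    have hnn := pvLcp_nonneg (cs.drop L.toNat) ((cs.take (R.toNat + 1)).reverse)
    omega
  | succ k ih =>
    intro L R tmp hk h0 hR hLR
    by_cases hlt : L < R
    · have hLn : L.toNat < cs.length := by omega
      have hRn : R.toNat < cs.length := by omega
      have e1 : PySem.List.pyGet? cs L = some cs[L.toNat] := by
        have := PySem.List.pyGet?_natCast cs L.toNat
        rw [Int.toNat_of_nonneg h0] at this
        rw [this, List.getElem?_eq_getElem hLn]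
      have e2 : PySem.List.pyGet? cs R = some cs[R.toNat] := by
        have := PySem.List.pyGet?_natCast cs R.toNat
        rw [Int.toNat_of_nonneg (by omega : (0:Int) ≤ R)] at this
        rw [this, List.getElem?_eq_getElem hRn]
      have hdrop : cs.drop L.toNat = cs[L.toNat] :: cs.drop (L.toNat + 1) :=
        List.drop_eq_getElem_cons hLn
      have htake : (cs.take (R.toNat + 1)).reverse = cs[R.toNat] :: (cs.take R.toNat).reverse := by
        rw [List.take_add_one, List.getElem?_eq_getElem hRn]
        simp
      rw [pvAloop, dif_pos hlt]
      simp only [e1, e2]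
      by_cases hab : cs[L.toNat] = cs[R.toNat]
      · rw [if_pos hab]
        have ih' := ih (L + 1) (R - 1) (tmp + 1) (by omega) (by omega) (by omega) (by omega)
        have eL : ((L + 1 : Int)).toNat = L.toNat + 1 := by omega
        have eR : ((R - 1 : Int)).toNat + 1 = R.toNat := by omega
        rw [eL, eR] at ih'
        rw [ih', hdrop, htake]
        simp only [pvLcp, if_pos hab]
        omega
      · rw [if_neg hab, hdrop, htake]
        simp only [pvLcp, if_neg hab]
        omega
    · rw [pvAloop, dif_neg hlt]
      have hnn := pvLcp_nonneg (cs.drop L.toNat) ((cs.take (R.toNat + 1)).reverse)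
      omega

-- A's loop at L = 0, R = i, tmp = 0, in closed form
lemma pvAloop_closed (cs : List Char) (i : Int) (h0 : 0 ≤ i) (hi : i < (cs.length : Int)) :
    pvAloop cs 0 i 0 = min (pvLcp cs ((cs.take (i.toNat + 1)).reverse)) ((i + 1) / 2) := by
  have h := pvAloop_eq cs (i - 0).toNat 0 i 0 le_rfl (by omega) (by omega) (by omega)
  simpa using h

-- B's per-i body, in the same closed form
lemma pvBody_eq (cs : List Char) (i : Int) (h0 : 0 ≤ i) (hi : i < (cs.length : Int)) :
    (if PySem.List.slice cs none (some (PySem.Int.floordiv (i + 1) 2))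
          = PySem.List.slice cs.reverse (some ((cs.length : Int) - 1 - i))
              (some ((cs.length : Int) - 1 - i + PySem.Int.floordiv (i + 1) 2))
      then (((PySem.List.slice cs none (some (PySem.Int.floordiv (i + 1) 2))).length : Int))
      else pvLcp (PySem.List.slice cs none (some (PySem.Int.floordiv (i + 1) 2)))
        (PySem.List.slice cs.reverse (some ((cs.length : Int) - 1 - i))
          (some ((cs.length : Int) - 1 - i + PySem.Int.floordiv (i + 1) 2))))
      = min (pvLcp cs ((cs.take (i.toNat + 1)).reverse)) ((i + 1) / 2) := by
  have hm : PySem.Int.floordiv (i + 1) 2 = (i + 1) / 2 :=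
    PySem.Int.floordiv_eq_ediv_of_pos (by norm_num)
  have hm0 : (0 : Int) ≤ (i + 1) / 2 := by omega
  rw [hm, PySem.List.slice_to cs hm0, PySem.List.slice_toNat cs.reverse (by omega) (by omega),
    List.drop_reverse]
  have e1 : cs.length - ((cs.length : Int) - 1 - i).toNat = i.toNat + 1 := by omega
  have e2 : ((cs.length : Int) - 1 - i + (i + 1) / 2).toNat - ((cs.length : Int) - 1 - i).toNat
      = ((i + 1) / 2).toNat := by omega
  rw [e1, e2]
  have h := pvMirror_min ((i + 1) / 2).toNat cs ((cs.take (i.toNat + 1)).reverse)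
    (by omega)
    (by simp only [List.length_reverse, List.length_take]; omega)
  rw [h, Int.toNat_of_nonneg hm0]

theorem NEXT1_spec : Claim_unchanged_NEXT1 := by
  intro s _ hD
  show NEXT1 s = NEXT1_alt s
  have hs : ¬ s = "" := hD
  have hne : s.toList ≠ [] := by simp_all
  have hn : (0 : Int) < (s.toList.length : Int) := by
    have := List.length_pos_iff.mpr hne
    exact_mod_cast this
  unfold NEXT1 NEXT1_alt
  dsimp only
  rw [PySem.List.foldl_append_singleton_eq_map, PySem.List.pyRange_one_cons hn, List.map_cons,
    List.singleton_append]
  congr 1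
  · rw [pvBody_eq s.toList 0 le_rfl hn]
    have := pvLcp_nonneg s.toList ((s.toList.take ((0 : Int).toNat + 1)).reverse)
    omega
  · rw [show (0 : Int) + 1 = 1 from by norm_num]
    apply List.map_congr_left
    intro i him
    rw [PySem.List.mem_pyRange_one] at him
    rw [pvAloop_closed s.toList i (by omega) him.2, pvBody_eq s.toList i (by omega) him.2]

theorem NEXT1_changed : Claim_changed_NEXT1 := by unfold Claim_changed_NEXT1; decide

theorem NEXT1_tight : Claim_exact_NEXT1 := by
  intro s _ hD
  unfold D_NEXT1 at hD; subst hD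
  decide
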